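-- pv_equiv track=rewrite | github.com/Mkm8961/harmonization | app.py | validate_ell
-- ===== SOURCE A (Python) =====
-- def validate_ell(parts):
--     return (
--         parts[0] in ["ELL", "ELBOW"] and
--         any(x in parts for x in ["45", "90"]) and
--         any(x in parts for x in ["WELD", "THRD", "SOCKET"]) and
--         any(p.replace('"', '').isdigit() for p in parts) and
--         any(x in parts for x in ["LR", "SR"]) and
--         any(x in parts for x in ["X", "Y", "API"])
--     )
-- ===== SOURCE B (Python) =====
-- def validate_ell(parts):
--     head_ok = parts[0] in ("ELL", "ELBOW")
--     ang = weld = num = rad = std = False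
--     for p in parts:
--         ang = ang or p in ("45", "90")
--         weld = weld or p in ("WELD", "THRD", "SOCKET")
--         num = num or p.replace('"', '').isdigit()
--         rad = rad or p in ("LR", "SR")
--         std = std or p in ("X", "Y", "API")
--     return head_ok and ang and weld and num and rad and std
-- ===== Notes on version B (the rewrite author's own statement) =====
-- stated objective: alternative
-- what changed: Replaces A's five independent membership/digit scans over the list with a single pass that maintains five boolean flags, combined with the head check at the end.
import Mathlib
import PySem

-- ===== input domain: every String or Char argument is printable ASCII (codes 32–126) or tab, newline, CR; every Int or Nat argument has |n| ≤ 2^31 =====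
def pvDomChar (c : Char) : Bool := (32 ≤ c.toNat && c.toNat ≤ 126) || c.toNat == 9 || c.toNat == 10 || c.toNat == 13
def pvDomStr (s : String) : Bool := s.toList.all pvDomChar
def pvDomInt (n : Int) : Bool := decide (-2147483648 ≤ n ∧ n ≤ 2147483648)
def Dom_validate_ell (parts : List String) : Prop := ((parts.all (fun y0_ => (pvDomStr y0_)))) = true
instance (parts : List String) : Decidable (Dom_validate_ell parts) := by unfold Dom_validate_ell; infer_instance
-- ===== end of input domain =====

-- B merges A's five independent scans of the list into one pass maintaining five boolean flags (alternative decomposition, same cost class).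

-- ===== PORT A =====
def validate_ell (parts : List String) : Bool :=
  match PySem.List.pyGet? parts 0 with
  | none => false   -- unreachable: Pre_ excludes the empty list (Python raises IndexError)
  | some p0 =>
    (["ELL", "ELBOW"].contains p0) &&
    (["45", "90"].any (fun x => parts.contains x)) &&
    (["WELD", "THRD", "SOCKET"].any (fun x => parts.contains x)) &&
    (parts.any (fun p => PySem.Str.strIsdigit (PySem.Str.replace p "\"" ""))) &&
    (["LR", "SR"].any (fun x => parts.contains x)) &&
    (["X", "Y", "API"].any (fun x => parts.contains x))

-- ===== PORT B =====
def validate_ell_alt (parts : List String) : Bool :=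
  match PySem.List.pyGet? parts 0 with
  | none => false   -- unreachable: Pre_ excludes the empty list (parts[0] raises IndexError)
  | some p0 =>
    let head_ok := p0 == "ELL" || p0 == "ELBOW"
    let fl := parts.foldl
      (fun (s : Bool × Bool × Bool × Bool × Bool) p =>
        (s.1 || p == "45" || p == "90",
         s.2.1 || p == "WELD" || p == "THRD" || p == "SOCKET",
         s.2.2.1 || PySem.Str.strIsdigit (PySem.Str.replace p "\"" ""),
         s.2.2.2.1 || p == "LR" || p == "SR",
         s.2.2.2.2 || p == "X" || p == "Y" || p == "API"))
      (false, false, false, false, false)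
    head_ok && fl.1 && fl.2.1 && fl.2.2.1 && fl.2.2.2.1 && fl.2.2.2.2

-- ===== PRECONDITION & SPEC =====
-- Pre_ excludes only the empty list, on which A (parts[0]) raises IndexError.
def Pre_validate_ell (parts : List String) : Prop := parts ≠ []
instance (parts : List String) : Decidable (Pre_validate_ell parts) := by unfold Pre_validate_ell; infer_instance
def pvWitness_validate_ell : List String := ["ELL", "90", "WELD", "2\"", "LR", "X"]
def Spec_validate_ell (parts : List String) (out : Bool) : Prop := out = validate_ell_alt parts
instance (parts : List String) (out : Bool) : Decidable (Spec_validate_ell parts out) := by unfold Spec_validate_ell; infer_instance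

-- ===== CLAIM (what is proved, stated in full; the proofs are below) =====
def Claim_equal_validate_ell : Prop := ∀ (parts : List String), Dom_validate_ell parts → Pre_validate_ell parts → Spec_validate_ell parts (validate_ell parts)

-- ===== LEMMAS AND PROOFS =====

-- The one-pass fold computes the five `any` flags, for any initial accumulator.
theorem foldl_flags (parts : List String) (a w n r t : Bool) :
    parts.foldl
      (fun (s : Bool × Bool × Bool × Bool × Bool) p =>
        (s.1 || p == "45" || p == "90",
         s.2.1 || p == "WELD" || p == "THRD" || p == "SOCKET",
         s.2.2.1 || PySem.Str.strIsdigit (PySem.Str.replace p "\"" ""),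
         s.2.2.2.1 || p == "LR" || p == "SR",
         s.2.2.2.2 || p == "X" || p == "Y" || p == "API"))
      (a, w, n, r, t)
    = (a || parts.any (fun p => p == "45" || p == "90"),
       w || parts.any (fun p => p == "WELD" || p == "THRD" || p == "SOCKET"),
       n || parts.any (fun p => PySem.Str.strIsdigit (PySem.Str.replace p "\"" "")),
       r || parts.any (fun p => p == "LR" || p == "SR"),
       t || parts.any (fun p => p == "X" || p == "Y" || p == "API")) := by
  induction parts generalizing a w n r t with
  | nil => simp
  | cons x xs ih =>
    simp only [List.foldl_cons, List.any_cons, ih]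
    simp [Bool.or_assoc]

theorem any_or {α : Type} (l : List α) (p q : α → Bool) :
    l.any (fun x => p x || q x) = (l.any p || l.any q) := by
  induction l with
  | nil => simp
  | cons x xs ih =>
    simp only [List.any_cons, ih]
    cases p x <;> cases q x <;> simp

theorem contains_eq_any (parts : List String) (x : String) :
    parts.contains x = parts.any (fun p => p == x) := by
  induction parts with
  | nil => rfl
  | cons y ys ih =>
    simp only [List.contains_cons, List.any_cons, ih]
    congr 1
    exact BEq.comm ..

-- ===== VERDICT (by name: the statement is the Claim_ definition above) =====
theorem validate_ell_spec : Claim_equal_validate_ell := by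
  intro parts _ _
  unfold Spec_validate_ell validate_ell validate_ell_alt
  cases h : PySem.List.pyGet? parts 0 with
  | none => rfl
  | some p0 =>
    simp only [foldl_flags, Bool.false_or, List.any_cons, List.any_nil,
      contains_eq_any, List.contains_cons, List.contains_nil, any_or, Bool.or_false]
    cases hp : (p0 == "ELL" || p0 == "ELBOW") <;>
      simp [Bool.and_assoc, Bool.or_comm, Bool.or_assoc, Bool.or_left_comm]
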